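-- pv_equiv track=rewrite | github.com/AlextheYounga/stock-market-programs | app/lab/rescaledrange/functions.py | linear_scales
-- ===== SOURCE A (Python) =====
-- def linear_scales(count, addend, limit):
--     """
--     The function will create linear scales, adding a number on each loop. This function is the same as
--     exponential_scales() except the scales have a perfectly constant slope.
--     The limit param will define how many loops the function runs, for how many scales the user wants.
--
--     For more details, see exponential_scales() function
--
--     Parameters
--     ----------
--     count    :int
--                 total number of items in main list of prices
--     addend  :int
--                 Number for which the scale will be based on. First scale will always be the entirety of the list
--                 Ex: if exponent=2 then scales=[1, 2, 4, 6, 8]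
--     limit     :int
--                 *For best results, 5 or 6*
--                 The scales shouldn't go on forever, in general, 5 or 6 is a good number here.
--
--     Returns
--     -------
--     dict
--         Dictionary of scales and number of items inside each scale.
--     """
--     x = addend
--     itr = []
--     scales = {}
--     for i in range(limit):
--         if (i == 0):
--             scales[i + 1] = count
--             itr.append(i + 1)
--         else:
--             scales[(itr[i - 1] + x)] = int(count / (itr[i - 1] + x))
--             itr.append(itr[i - 1] + x)
--
--     return scales
-- ===== SOURCE B (Python) =====
-- def linear_scales(count, addend, limit):
--     return {1 + i * addend: int(count / (1 + i * addend)) for i in range(limit)}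
-- ===== Notes on version B (the rewrite author's own statement) =====
-- stated objective: simpler
-- what changed: B drops A's running `itr` accumulator and i==0 special case, computing each scale key directly by the closed form 1 + i*addend in a single dict comprehension.
import Mathlib
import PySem

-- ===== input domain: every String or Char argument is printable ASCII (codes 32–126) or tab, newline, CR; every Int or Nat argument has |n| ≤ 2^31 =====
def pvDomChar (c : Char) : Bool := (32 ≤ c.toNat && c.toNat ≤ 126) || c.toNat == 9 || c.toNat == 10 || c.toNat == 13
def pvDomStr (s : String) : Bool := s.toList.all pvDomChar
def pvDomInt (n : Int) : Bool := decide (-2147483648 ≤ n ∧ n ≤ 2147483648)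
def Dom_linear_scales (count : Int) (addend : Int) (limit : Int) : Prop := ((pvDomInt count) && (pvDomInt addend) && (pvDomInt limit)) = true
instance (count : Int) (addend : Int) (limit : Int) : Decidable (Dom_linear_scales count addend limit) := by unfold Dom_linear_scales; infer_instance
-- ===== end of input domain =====

-- B replaces A's running `itr` accumulator by the closed-form key 1 + i*addend (objective: simpler).

-- ===== PORT A =====
-- loop body of A: carries the accumulator list `itr` and the dict `scales`.
-- int(count / k) is ported as PySem.Int.truncdiv, exact for |count| ≤ 2^31 (Dom).
def lsStepA (count x : Int) (s : List Int × PySem.Dict Int Int) (i : Int) :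
    List Int × PySem.Dict Int Int :=
  if i == 0 then
    (s.1 ++ [i + 1], s.2.insert (i + 1) count)
  else
    -- itr[i-1]: the index is always in range here (itr has length i), so pyGetD's default is never used
    let prev := PySem.List.pyGetD s.1 (i - 1) 0
    (s.1 ++ [prev + x], s.2.insert (prev + x) (PySem.Int.truncdiv count (prev + x)))

def linear_scales (count : Int) (addend : Int) (limit : Int) : List (Int × Int) :=
  (((PySem.List.pyRange 0 limit 1).foldl (lsStepA count addend)
      ([], PySem.Dict.empty)).2).items

-- ===== PORT B =====
-- dict comprehension {1 + i*addend : int(count/(1 + i*addend)) for i in range(limit)}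
def lsStepB (count addend : Int) (d : PySem.Dict Int Int) (i : Int) : PySem.Dict Int Int :=
  d.insert (1 + i * addend) (PySem.Int.truncdiv count (1 + i * addend))

def linear_scales_alt (count : Int) (addend : Int) (limit : Int) : List (Int × Int) :=
  ((PySem.List.pyRange 0 limit 1).foldl (lsStepB count addend) PySem.Dict.empty).items

-- ===== PRECONDITION & SPEC =====
-- Pre_ excludes exactly the inputs where Python raises ZeroDivisionError (a scale key
-- 1 + i*addend hits 0, which happens iff addend = -1 and the loop reaches i = 1);
-- B raises there too.
def Pre_linear_scales (count : Int) (addend : Int) (limit : Int) : Prop :=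
  ¬ (addend = -1 ∧ 2 ≤ limit)
instance (count : Int) (addend : Int) (limit : Int) : Decidable (Pre_linear_scales count addend limit) := by unfold Pre_linear_scales; infer_instance

def pvWitness_linear_scales : Int × Int × Int := (100, 2, 5)

def Spec_linear_scales (count : Int) (addend : Int) (limit : Int) (out : List (Int × Int)) : Prop := out = linear_scales_alt count addend limit
instance (count : Int) (addend : Int) (limit : Int) (out : List (Int × Int)) : Decidable (Spec_linear_scales count addend limit out) := by unfold Spec_linear_scales; infer_instance

-- ===== CLAIM (what is proved, stated in full; the proofs are below) =====
def Claim_equal_linear_scales : Prop := ∀ (count : Int) (addend : Int) (limit : Int), Dom_linear_scales count addend limit → Pre_linear_scales count addend limit → Spec_linear_scales count addend limit (linear_scales count addend limit)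

-- ===== LEMMAS AND PROOFS =====

-- the fold range only depends on limit.toNat
lemma ls_range_toNat (limit : Int) :
    PySem.List.pyRange 0 limit 1 = PySem.List.pyRange 0 (limit.toNat : Int) 1 := by
  by_cases h : limit ≤ 0
  · rw [PySem.List.pyRange_one_eq_nil h, PySem.List.pyRange_one_eq_nil (by omega)]
  · congr 1; omega

-- invariant: after n iterations A's state is (closed-form itr list, B's dict)
lemma ls_state (count x : Int) (n : Nat) :
    (PySem.List.pyRange 0 (n : Int) 1).foldl (lsStepA count x) ([], PySem.Dict.empty)
      = ((List.range n).map (fun j : Nat => 1 + (j : Int) * x),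
         (PySem.List.pyRange 0 (n : Int) 1).foldl (lsStepB count x) PySem.Dict.empty) := by
  induction n with
  | zero => simp [PySem.List.pyRange_one_eq_nil]
  | succ n ih =>
    have hsplit : PySem.List.pyRange 0 ((n + 1 : Nat) : Int) 1
        = PySem.List.pyRange 0 (n : Int) 1 ++ [(n : Int)] := by
      push_cast
      exact PySem.List.pyRange_one_succ_right (by positivity)
    rw [hsplit, List.foldl_append, List.foldl_append, ih]
    simp only [List.foldl_cons, List.foldl_nil]
    rcases Nat.eq_zero_or_pos n with hn | hn
    · subst hn
      simp [lsStepA, lsStepB, PySem.Int.truncdiv]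
    · have hne : ((n : Int) == 0) = false := by
        simp; omega
      have hget : PySem.List.pyGetD ((List.range n).map (fun j : Nat => 1 + (j : Int) * x)) ((n : Int) - 1) 0
          = 1 + ((n - 1 : Nat) : Int) * x := by
        have h1 : ((n : Int) - 1) = ((n - 1 : Nat) : Int) := by omega
        rw [h1, PySem.List.pyGetD_natCast]
        simp [List.getD_eq_getElem?_getD, List.getElem?_range (show n - 1 < n by omega)]
      have hkey : (1 : Int) + ((n - 1 : Nat) : Int) * x + x = 1 + (n : Int) * x := by
        push_cast [Nat.cast_sub hn]; ring
      simp only [lsStepA, lsStepB, hne, Bool.false_eq_true, if_false, hget, hkey]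
      rw [List.range_succ, List.map_append]; simp

-- ===== VERDICT (by name: the statement is the Claim_ definition above) =====
theorem linear_scales_spec : Claim_equal_linear_scales := by
  intro count addend limit _ _
  unfold Spec_linear_scales linear_scales linear_scales_alt
  rw [ls_range_toNat, ls_state]
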